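-- pv_equiv track=rewrite | github.com/tomilov-dev/DSA | leetcode_problems/python/lc1351_count_neg_numbers_in_matrix.py | bs_fneg
-- ===== SOURCE A (Python) =====
-- def bs_fneg(array: list[int]) -> int:
--     lo = 0
--     hi = len(array) - 1
--     while lo <= hi:
--         mid = lo + (hi - lo) // 2
--         if array[mid] < 0:
--             hi = mid - 1
--         else:
--             lo = mid + 1
--     return lo
-- ===== SOURCE B (Python) =====
-- def bs_fneg(array: list[int]) -> int:
--     def go(sub: list[int], offset: int) -> int:
--         if not sub:
--             return offset
--         m = (len(sub) - 1) // 2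
--         if sub[m] < 0:
--             return go(sub[:m], offset)
--         return go(sub[m + 1:], offset + m + 1)
--     return go(array, 0)
-- ===== Notes on version B (the rewrite author's own statement) =====
-- stated objective: alternative
-- what changed: A's in-place index-pair while loop is replaced by divide-and-conquer recursion on physical subarray slices (go(sub, offset) probes the middle element and recurses on sub[:m] or sub[m+1:] with an offset accumulator), which performs the identical probe sequence and returns the same index.
import Mathlib
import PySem

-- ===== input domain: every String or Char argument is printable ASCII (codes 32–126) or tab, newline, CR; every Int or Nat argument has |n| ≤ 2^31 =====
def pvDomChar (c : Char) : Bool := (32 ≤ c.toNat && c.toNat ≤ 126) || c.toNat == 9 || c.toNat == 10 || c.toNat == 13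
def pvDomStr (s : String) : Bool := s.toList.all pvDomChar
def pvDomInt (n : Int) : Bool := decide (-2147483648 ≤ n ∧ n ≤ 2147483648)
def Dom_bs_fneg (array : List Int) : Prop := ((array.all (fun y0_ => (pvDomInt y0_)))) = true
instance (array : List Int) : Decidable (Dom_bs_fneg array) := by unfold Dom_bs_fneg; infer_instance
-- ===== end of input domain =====

-- B replaces A's index-pair while loop by divide-and-conquer on physical subarray slices with an offset accumulator; same probes, same result (objective: alternative).

-- ===== PORT A =====
-- while lo <= hi … ; fuel only makes the loop structurally total: fuel ≥ (hi+1-lo).toNat always holds,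
-- so the fuel-0 branch is reached exactly when lo > hi; index mid lies in [0, len), so array[mid] never raises
def bsLoopA (array : List Int) : Nat → Int → Int → Int
  | 0, lo, _hi => lo
  | Nat.succ n, lo, hi =>
    if lo ≤ hi then
      let mid := lo + PySem.Int.floordiv (hi - lo) 2
      if PySem.List.pyGetD array mid 0 < 0 then bsLoopA array n lo (mid - 1)
      else bsLoopA array n (mid + 1) hi
    else lo

def bs_fneg (array : List Int) : Int :=
  bsLoopA array array.length 0 (array.length - 1)

-- ===== PORT B =====
-- go(sub, offset): recursion on the subarray itself; fuel ≥ sub.length always holds, so the fuel-0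
-- branch is reached only for the empty subarray; m lies in [0, len sub), so sub[m] never raises
def bsGo : Nat → List Int → Int → Int
  | 0, _sub, offset => offset
  | Nat.succ n, sub, offset =>
    if sub.isEmpty then offset
    else
      let m := PySem.Int.floordiv ((sub.length : Int) - 1) 2
      if PySem.List.pyGetD sub m 0 < 0 then
        bsGo n (PySem.List.slice sub none (some m)) offset
      else
        bsGo n (PySem.List.slice sub (some (m + 1)) none) (offset + m + 1)

def bs_fneg_alt (array : List Int) : Int :=
  bsGo array.length array 0

-- ===== PRECONDITION & SPEC =====
def Spec_bs_fneg (array : List Int) (out : Int) : Prop := out = bs_fneg_alt array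
instance (array : List Int) (out : Int) : Decidable (Spec_bs_fneg array out) := by unfold Spec_bs_fneg; infer_instance

-- ===== CLAIM (what is proved, stated in full; the proofs are below) =====
def Claim_equal_bs_fneg : Prop := ∀ (array : List Int), Dom_bs_fneg array → Spec_bs_fneg array (bs_fneg array)

-- ===== LEMMAS AND PROOFS =====

-- A's loop on the window [lo, hi] equals B's recursion on the physical subarray array[lo : hi+1]
-- with offset lo, for any adequate fuel on either side
lemma loopA_eq_go (array : List Int) :
    ∀ (k fA fB : Nat) (lo hi : Int), (hi + 1 - lo).toNat = k → k ≤ fA → k ≤ fB →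
      0 ≤ lo → hi < array.length →
      bsLoopA array fA lo hi = bsGo fB ((array.drop lo.toNat).take (hi + 1 - lo).toNat) lo := by
  intro k
  induction k using Nat.strong_induction_on with
  | _ k ih =>
    intro fA fB lo hi hk hfA hfB hlo hhi
    by_cases h : lo ≤ hi
    · -- the window is nonempty, so both fuels are positive
      obtain ⟨n, rfl⟩ : ∃ n, fA = n + 1 := ⟨fA - 1, by omega⟩
      obtain ⟨p, rfl⟩ : ∃ p, fB = p + 1 := ⟨fB - 1, by omega⟩
      rw [bsLoopA, bsGo]
      have hlen : ((array.drop lo.toNat).take (hi + 1 - lo).toNat).length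
          = (hi + 1 - lo).toNat := by
        simp only [List.length_take, List.length_drop]
        omega
      have hnotE : ((array.drop lo.toNat).take (hi + 1 - lo).toNat).isEmpty = false := by
        have : ((array.drop lo.toNat).take (hi + 1 - lo).toNat) ≠ [] := by
          intro h0; rw [h0] at hlen; simp at hlen; omega
        simpa [List.isEmpty_iff] using this
      have hfd : PySem.Int.floordiv (hi - lo) 2 = (hi - lo) / 2 :=
        PySem.Int.floordiv_eq_ediv_of_pos (by omega)
      have hfd2 : PySem.Int.floordiv
            ((((array.drop lo.toNat).take (hi + 1 - lo).toNat).length : Int) - 1) 2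
          = (hi - lo) / 2 := by
        rw [hlen, PySem.Int.floordiv_eq_ediv_of_pos (by omega)]
        congr 1; omega
      simp only [h, if_pos, hnotE, Bool.false_eq_true, if_false, hfd, hfd2]
      have hmb : 0 ≤ (hi - lo) / 2 ∧ (hi - lo) / 2 ≤ hi - lo := by
        constructor
        · exact Int.ediv_nonneg (by omega) (by omega)
        · omega
      -- the probed elements coincide
      have hprobe : PySem.List.pyGetD ((array.drop lo.toNat).take (hi + 1 - lo).toNat)
            ((hi - lo) / 2) 0
          = PySem.List.pyGetD array (lo + (hi - lo) / 2) 0 := by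
        rw [PySem.List.pyGetD_eq_getElem _ 0 (by omega) (by rw [hlen]; omega),
            PySem.List.pyGetD_eq_getElem _ 0 (by omega) (by omega)]
        rw [List.getElem_take, List.getElem_drop]
        congr 1; omega
      rw [hprobe]
      split
      · -- negative: shrink right boundary
        rw [PySem.List.slice_to _ (by omega)]
        rw [ih ((lo + (hi - lo) / 2 - 1) + 1 - lo).toNat (by omega) n p lo
              (lo + (hi - lo) / 2 - 1) rfl (by omega) (by omega) hlo (by omega)]
        congr 1
        rw [List.take_take]
        congr 1; omega
      · -- nonnegative: shrink left boundary
        rw [PySem.List.slice_from _ (by omega)]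
        rw [ih (hi + 1 - (lo + (hi - lo) / 2 + 1)).toNat (by omega) n p
              (lo + (hi - lo) / 2 + 1) hi rfl (by omega) (by omega) (by omega) hhi]
        rw [List.drop_take, List.drop_drop]
        congr 2
        · omega
        · congr 1; omega
    · -- empty window: both sides return lo whatever the fuel
      have h0 : (hi + 1 - lo).toNat = 0 := by omega
      have hnil : (array.drop lo.toNat).take (hi + 1 - lo).toNat = [] := by
        rw [h0]; simp
      cases fA <;> cases fB <;> simp [bsLoopA, bsGo, h, hnil]

-- ===== VERDICT (by name: the statement is the Claim_ definition above) =====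
theorem bs_fneg_spec : Claim_equal_bs_fneg := by
  intro array _
  unfold Spec_bs_fneg bs_fneg bs_fneg_alt
  rw [loopA_eq_go array (((array.length : Int) - 1) + 1 - 0).toNat array.length array.length 0
        ((array.length : Int) - 1) rfl (by omega) (by omega) (by omega) (by omega)]
  congr 1
  simp
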